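-- pv_equiv track=rewrite | github.com/PranavNagrecha/AwesomeSalesforceSkills | skills/data/industries-data-migration/scripts/check_industries_data_migration.py | check_load_order
-- ===== SOURCE A (Python) =====
-- PARENT_REQUIREMENTS: dict[str, list[str]] = {
--     "insurancepolicy": ["account"],
--     "insurancepolicyparticipant": ["insurancepolicy"],
--     "insurancepolicyasset": ["insurancepolicy"],
--     "insurancepolicycoverage": ["insurancepolicy"],
--     "insurancepolicytransaction": ["insurancepolicy"],
--     "billingstatement": ["insurancepolicy"],
--     "premise": ["account"],
--     "servicepoint": ["premise"],
--     "serviceaccount": ["account", "servicepoint"],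
-- }
--
-- def check_load_order(objects_in_order: list[str]) -> list[str]:
--     """Verify that no child object appears before its required parent."""
--     issues: list[str] = []
--     seen: set[str] = set()
--
--     for obj in objects_in_order:
--         obj_lower = obj.lower()
--         parents = PARENT_REQUIREMENTS.get(obj_lower, [])
--         for parent in parents:
--             if parent not in seen:
--                 issues.append(
--                     f"Load order violation: '{obj}' appears before its required parent "
--                     f"'{parent}'. '{parent}' must be loaded and confirmed before '{obj}'."
--                 )
--         seen.add(obj_lower)
--
--     return issues
-- ===== SOURCE B (Python) =====
-- PARENT_REQUIREMENTS: dict[str, list[str]] = {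
--     "insurancepolicy": ["account"],
--     "insurancepolicyparticipant": ["insurancepolicy"],
--     "insurancepolicyasset": ["insurancepolicy"],
--     "insurancepolicycoverage": ["insurancepolicy"],
--     "insurancepolicytransaction": ["insurancepolicy"],
--     "billingstatement": ["insurancepolicy"],
--     "premise": ["account"],
--     "servicepoint": ["premise"],
--     "serviceaccount": ["account", "servicepoint"],
-- }
--
-- def check_load_order(objects_in_order: list[str]) -> list[str]:
--     """Verify that no child object appears before its required parent."""
--     first_index: dict[str, int] = {}
--     for i, obj in enumerate(objects_in_order):
--         key = obj.lower()
--         if key not in first_index: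
--             first_index[key] = i
--
--     issues: list[str] = []
--     for i, obj in enumerate(objects_in_order):
--         for parent in PARENT_REQUIREMENTS.get(obj.lower(), []):
--             j = first_index.get(parent)
--             if j is None or j >= i:
--                 issues.append(
--                     f"Load order violation: '{obj}' appears before its required parent "
--                     f"'{parent}'. '{parent}' must be loaded and confirmed before '{obj}'."
--                 )
--     return issues
-- ===== Notes on version B (the rewrite author's own statement) =====
-- stated objective: alternative
-- what changed: Replaces the incremental seen-set single pass with a build-a-first-occurrence-index table pass followed by a position-comparison pass: a parent is 'not yet loaded' at position i iff its first occurrence index is absent or >= i.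
import Mathlib
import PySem

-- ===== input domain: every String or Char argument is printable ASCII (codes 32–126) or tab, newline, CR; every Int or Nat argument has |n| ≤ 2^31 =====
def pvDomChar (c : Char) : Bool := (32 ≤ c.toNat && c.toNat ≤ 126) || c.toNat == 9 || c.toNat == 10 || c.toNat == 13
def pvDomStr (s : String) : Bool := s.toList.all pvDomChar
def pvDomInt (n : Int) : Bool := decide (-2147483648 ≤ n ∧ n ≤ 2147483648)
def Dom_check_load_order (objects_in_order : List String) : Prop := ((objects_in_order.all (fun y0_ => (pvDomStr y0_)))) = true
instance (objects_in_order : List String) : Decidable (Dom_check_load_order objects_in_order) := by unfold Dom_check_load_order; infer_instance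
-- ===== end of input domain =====

-- B replaces A's incremental seen-set pass by a first-occurrence index table plus a
-- position-comparison pass (objective: alternative decomposition, same cost).

-- ===== PORT A =====
def pvParentReqs : PySem.Dict String (List String) := PySem.Dict.ofList
  [("insurancepolicy", ["account"]),
   ("insurancepolicyparticipant", ["insurancepolicy"]),
   ("insurancepolicyasset", ["insurancepolicy"]),
   ("insurancepolicycoverage", ["insurancepolicy"]),
   ("insurancepolicytransaction", ["insurancepolicy"]),
   ("billingstatement", ["insurancepolicy"]),
   ("premise", ["account"]),
   ("servicepoint", ["premise"]),
   ("serviceaccount", ["account", "servicepoint"])]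

def pvMsg (obj parent : String) : String :=
  "Load order violation: '" ++ obj ++ "' appears before its required parent '" ++
    parent ++ "'. '" ++ parent ++ "' must be loaded and confirmed before '" ++ obj ++ "'."

def check_load_order (objects_in_order : List String) : List String :=
  (objects_in_order.foldl
    (fun (st : List String × PySem.Set String) obj =>
      let objLower := PySem.Str.lower obj
      let parents := pvParentReqs.getD objLower []
      let issues := parents.foldl
        (fun iss parent =>
          if PySem.Set.contains st.2 parent then iss else iss ++ [pvMsg obj parent])
        st.1
      (issues, PySem.Set.add st.2 objLower))
    ([], PySem.Set.empty)).1

-- ===== PORT B =====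
def pvFirstIndex (objects_in_order : List String) : PySem.Dict String Int :=
  (PySem.List.enumerate objects_in_order).foldl
    (fun d p =>
      let key := PySem.Str.lower p.2
      if d.contains key then d else d.insert key p.1)
    PySem.Dict.empty

def check_load_order_alt (objects_in_order : List String) : List String :=
  let firstIndex := pvFirstIndex objects_in_order
  (PySem.List.enumerate objects_in_order).foldl
    (fun iss p =>
      (pvParentReqs.getD (PySem.Str.lower p.2) []).foldl
        (fun iss parent =>
          if (match firstIndex.get? parent with
              | none => true
              | some j => decide (j ≥ p.1)) then iss ++ [pvMsg p.2 parent] else iss)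
        iss)
    []

-- ===== PRECONDITION & SPEC =====
def Spec_check_load_order (objects_in_order : List String) (out : List String) : Prop := out = check_load_order_alt objects_in_order
instance (objects_in_order : List String) (out : List String) : Decidable (Spec_check_load_order objects_in_order out) := by unfold Spec_check_load_order; infer_instance

-- ===== CLAIM (what is proved, stated in full; the proofs are below) =====
def Claim_equal_check_load_order : Prop := ∀ (objects_in_order : List String), Dom_check_load_order objects_in_order → Spec_check_load_order objects_in_order (check_load_order objects_in_order)

-- ===== LEMMAS AND PROOFS =====

-- first-occurrence index: value of the index dict built from suffix `xs` at offset `k`, over start `d`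
theorem pvFirstIndex_go (xs : List String) (k : Int) (d : PySem.Dict String Int) (p : String) :
    ((PySem.List.enumerate xs k).foldl
        (fun d (q : Int × String) =>
          let key := PySem.Str.lower q.2
          if d.contains key then d else d.insert key q.1) d).get? p
      = ((d.get? p).or (((xs.map PySem.Str.lower).idxOf? p).map (fun n => k + (n : Int)))) := by
  induction xs generalizing k d with
  | nil => simp [PySem.List.enumerate]
  | cons x xs ih =>
    rw [PySem.List.enumerate_cons, List.foldl_cons]
    simp only [List.map_cons, List.idxOf?, List.findIdx?_cons]
    by_cases hp : PySem.Str.lower x = p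
    · simp only [hp, beq_self_eq_true, if_pos]
      by_cases hc : d.contains p
      · rw [if_pos (by simpa [hp] using hc), ih]
        have hs : (d.get? p).isSome := by rw [← PySem.Dict.contains_eq_isSome_get?]; exact hc
        obtain ⟨v, hv⟩ := Option.isSome_iff_exists.mp hs
        simp [hv]
      · rw [if_neg (by simpa [hp] using hc), ih]
        have hn : d.get? p = none := (PySem.Dict.get?_eq_none_iff_contains d p).mpr (by simpa using hc)
        rw [PySem.Dict.get?_insert]
        simp [hn]
    · have hbeq : (PySem.Str.lower x == p) = false := by simpa using hp
      simp only [hbeq, Bool.false_eq_true, if_neg, not_false_iff]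
      by_cases hc : d.contains (PySem.Str.lower x)
      · rw [if_pos hc, ih]
        congr 1
        cases hfi : List.findIdx? (fun y => y == p) (List.map PySem.Str.lower xs) with
        | none => simp [List.idxOf?, hfi]
        | some n => simp [List.idxOf?, hfi]; omega
      · rw [if_neg hc, ih]
        rw [PySem.Dict.get?_insert]
        rw [if_neg (fun h => hp h.symm)]
        congr 1
        cases hfi : List.findIdx? (fun y => y == p) (List.map PySem.Str.lower xs) with
        | none => simp [List.idxOf?, hfi]
        | some n => simp [List.idxOf?, hfi]; omega

theorem pvFirstIndex_get? (l : List String) (p : String) :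
    (pvFirstIndex l).get? p = ((l.map PySem.Str.lower).idxOf? p).map (fun n => (n : Int)) := by
  have h := pvFirstIndex_go l 0 PySem.Dict.empty p
  simpa [PySem.Dict.get?_empty] using h

-- membership in a prefix, phrased through the first-occurrence index of the whole list
theorem pvContains_prefix (m₁ m₂ : List String) (p : String) :
    m₁.contains p
      = (match (m₁ ++ m₂).idxOf? p with
         | none => false
         | some n => decide ((n : Int) < (m₁.length : Int))) := by
  induction m₁ with
  | nil =>
    cases h : (([] ++ m₂ : List String)).idxOf? p with
    | none => simp
    | some n => simp
  | cons a m₁ ih =>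
    by_cases hp : a = p
    · have hbeq : (a == p) = true := by simp [hp]
      have hbeq' : (p == a) = true := by simp [hp.symm]
      simp [List.idxOf?, List.findIdx?_cons, hbeq]
      exact Or.inl hp.symm
    · have hbeq : (a == p) = false := by simpa using hp
      have hbeq' : (p == a) = false := by simpa using fun h => hp h.symm
      rw [List.cons_append, List.contains_cons, hbeq', Bool.false_or, ih]
      simp only [List.idxOf?, List.findIdx?_cons, hbeq, Bool.false_eq_true, if_false]
      cases h : List.findIdx? (fun y => y == p) (m₁ ++ m₂) with
      | none => simp
      | some n =>
        simp only [Option.map_some, List.length_cons]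
        by_cases hn : ((n : Int) < (m₁.length : Int))
        · rw [decide_eq_true hn, decide_eq_true (by push_cast; omega)]
        · rw [decide_eq_false hn, decide_eq_false (by push_cast; omega)]

-- main invariant: A's fold over the suffix, with the seen-set of the prefix, equals
-- B's fold over the enumerated suffix against any dict characterised like pvFirstIndex
theorem pvMain (rest pre iss : List String) (first : PySem.Dict String Int)
    (hf : ∀ p, first.get? p = (((pre ++ rest).map PySem.Str.lower).idxOf? p).map (fun n => (n : Int))) :
    (rest.foldl
      (fun (st : List String × PySem.Set String) obj =>
        let objLower := PySem.Str.lower obj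
        let parents := pvParentReqs.getD objLower []
        let issues := parents.foldl
          (fun iss parent =>
            if PySem.Set.contains st.2 parent then iss else iss ++ [pvMsg obj parent])
          st.1
        (issues, PySem.Set.add st.2 objLower))
      (iss, PySem.Set.ofList (pre.map PySem.Str.lower))).1
    = (PySem.List.enumerate rest (pre.length : Int)).foldl
        (fun iss p =>
          (pvParentReqs.getD (PySem.Str.lower p.2) []).foldl
            (fun iss parent =>
              if (match first.get? parent with
                  | none => true
                  | some j => decide (j ≥ p.1)) then iss ++ [pvMsg p.2 parent] else iss)
            iss)
        iss := by
  induction rest generalizing pre iss with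
  | nil => simp
  | cons x rest ih =>
    rw [List.foldl_cons, PySem.List.enumerate_cons, List.foldl_cons]
    simp only
    -- the two inner folds over the parents list are pointwise equal
    have hinner : ∀ (acc : List String),
        ((pvParentReqs.getD (PySem.Str.lower x) []).foldl
          (fun iss parent =>
            if PySem.Set.contains (PySem.Set.ofList (pre.map PySem.Str.lower)) parent then iss
            else iss ++ [pvMsg x parent]) acc)
        = ((pvParentReqs.getD (PySem.Str.lower x) []).foldl
          (fun iss parent =>
            if (match first.get? parent with
                | none => true
                | some j => decide (j ≥ ((pre.length : Int)))) then iss ++ [pvMsg x parent]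
            else iss) acc) := by
      intro acc
      apply PySem.List.foldl_congr_mem
      intro acc' parent _
      have hcontains : PySem.Set.contains (PySem.Set.ofList (pre.map PySem.Str.lower)) parent
          = (pre.map PySem.Str.lower).contains parent := by
        simp [PySem.Set.contains, PySem.Set.mem_ofList]
      rw [hcontains, pvContains_prefix (pre.map PySem.Str.lower) ((x :: rest).map PySem.Str.lower),
        ← List.map_append, hf parent]
      cases h : ((pre ++ x :: rest).map PySem.Str.lower).idxOf? parent with
      | none => simp
      | some n =>
        simp only [List.length_map]
        by_cases hn : (n : Int) < (pre.length : Int)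
        · rw [if_pos (by simpa using hn), if_neg (by simpa using (by omega : ¬ ((pre.length : Int) ≤ (n : Int))))]
        · rw [if_neg (by simpa using hn), if_pos (by simpa using (by omega : (pre.length : Int) ≤ (n : Int)))]
    rw [hinner]
    have hset : PySem.Set.ofList ((pre ++ [x]).map PySem.Str.lower)
        = PySem.Set.add (PySem.Set.ofList (pre.map PySem.Str.lower)) (PySem.Str.lower x) := by
      rw [List.map_append, PySem.Set.ofList_eq_foldl, List.foldl_append,
        ← PySem.Set.ofList_eq_foldl]
      simp
    rw [← hset]
    have hf' : ∀ p, first.get? p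
        = ((((pre ++ [x]) ++ rest).map PySem.Str.lower).idxOf? p).map (fun n => (n : Int)) := by
      intro p; rw [List.append_assoc]; exact hf p
    rw [ih (pre ++ [x]) _ hf']
    simp [List.length_append]

-- ===== VERDICT (by name: the statement is the Claim_ definition above) =====
theorem check_load_order_spec : Claim_equal_check_load_order := by
  intro l _
  unfold Spec_check_load_order check_load_order check_load_order_alt
  have h := pvMain l [] [] (pvFirstIndex l) (fun p => by simpa using pvFirstIndex_get? l p)
  simpa using h
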